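-- pv_equiv track=rewrite | github.com/NeroZero747/Python-Learning | scripts/_fix_mistakes_l03_git.py | find_mistakes_body
-- ===== SOURCE A (Python) =====
-- def find_mistakes_body(html: str):
--     """Find start/end indices of the body div inside #mistakes."""
--     section_pos = html.find('<section id="mistakes">')
--     if section_pos == -1:
--         return None, None
--
--     marker = '<div class="bg-white px-8 py-7 space-y-6">'
--     body_start = html.find(marker, section_pos)
--     if body_start == -1:
--         return None, None
--
--     content_start = body_start + len(marker)
--     depth = 1
--     pos = content_start
--     while pos < len(html) and depth > 0:
--         next_open = html.find('<div', pos)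
--         next_close = html.find('</div>', pos)
--         if next_close == -1:
--             break
--         if next_open != -1 and next_open < next_close:
--             depth += 1
--             pos = next_open + 4
--         else:
--             depth -= 1
--             if depth == 0:
--                 return content_start, next_close
--             pos = next_close + 6
--     return None, None
-- ===== SOURCE B (Python) =====
-- def _div_tokens(s, start):
--     """Ordered (index, is_close) stream of non-overlapping '<div'/'</div>' tokens from start."""
--     toks = []
--     i = start
--     n = len(s)
--     while i < n:
--         if s.startswith('</div>', i):
--             toks.append((i, True))
--             i += 6
--         elif s.startswith('<div', i):
--             toks.append((i, False))
--             i += 4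
--         else:
--             i += 1
--     return toks
--
--
-- def find_mistakes_body(html: str):
--     """Find start/end indices of the body div inside #mistakes."""
--     section_pos = html.find('<section id="mistakes">')
--     if section_pos == -1:
--         return None, None
--
--     marker = '<div class="bg-white px-8 py-7 space-y-6">'
--     body_start = html.find(marker, section_pos)
--     if body_start == -1:
--         return None, None
--
--     content_start = body_start + len(marker)
--     depth = 1
--     for pos, is_close in _div_tokens(html, content_start):
--         if is_close:
--             depth -= 1
--             if depth == 0:
--                 return content_start, pos
--         else:
--             depth += 1
--     return None, None
-- ===== Notes on version B (the rewrite author's own statement) =====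
-- stated objective: alternative
-- what changed: A's loop interleaves two html.find scans per iteration and picks the nearer match; B is two-phase: it first materialises the ordered stream of non-overlapping '<div'/'</div>' tokens after the marker, then folds a depth counter over that token list.
import Mathlib
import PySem

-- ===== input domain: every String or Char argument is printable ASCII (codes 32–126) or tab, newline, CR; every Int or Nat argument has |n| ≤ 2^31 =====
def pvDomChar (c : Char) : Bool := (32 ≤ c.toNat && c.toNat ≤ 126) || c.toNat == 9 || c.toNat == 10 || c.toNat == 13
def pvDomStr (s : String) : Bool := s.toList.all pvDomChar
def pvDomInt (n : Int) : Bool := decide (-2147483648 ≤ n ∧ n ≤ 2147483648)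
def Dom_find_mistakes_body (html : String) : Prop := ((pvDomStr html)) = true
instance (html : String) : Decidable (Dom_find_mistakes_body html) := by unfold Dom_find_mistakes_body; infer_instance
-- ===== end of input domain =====

-- B replaces A's interleaved find/find/min loop by a two-phase design: first build
-- the ordered list of '<div'/'</div>' tokens after the marker, then fold a depth
-- counter over that list (objective: alternative).

-- ===== PORT A =====
-- the while loop of A; fuel s.length + 1 is a totality device only: pos strictly
-- increases each iteration and the loop stops once pos ≥ len(html)
def fmbLoopA (s : List Char) : Nat → Int → Int → Int → Option Int × Option Int
  | 0, _, _, _ => (none, none)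
  | f+1, depth, pos, cs =>
    if pos < PySem.Chars.len s ∧ 0 < depth then
      let no := PySem.Chars.findFrom s "<div".toList pos none
      let nc := PySem.Chars.findFrom s "</div>".toList pos none
      if nc = -1 then (none, none)
      else if no ≠ -1 ∧ no < nc then fmbLoopA s f (depth+1) (no+4) cs
      else if depth = 1 then (some cs, some nc)
      else fmbLoopA s f (depth-1) (nc+6) cs
    else (none, none)

def find_mistakes_body (html : String) : Option Int × Option Int :=
  let s := html.toList
  let section_pos := PySem.Chars.find s "<section id=\"mistakes\">".toList
  if section_pos = -1 then (none, none)
  else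
    let marker := "<div class=\"bg-white px-8 py-7 space-y-6\">".toList
    let body_start := PySem.Chars.findFrom s marker section_pos none
    if body_start = -1 then (none, none)
    else
      let content_start := body_start + PySem.Chars.len marker
      fmbLoopA s (s.length + 1) 1 content_start content_start

-- ===== PORT B =====
-- B's tokenizer _div_tokens: the ordered (index, is_close) stream of
-- non-overlapping '<div'/'</div>' tokens from start; fuel s.length + 1 is a
-- totality device only (i strictly increases and the loop stops at i ≥ len)
def fmbTokens (s : List Char) : Nat → Nat → List (Nat × Bool)
  | 0, _ => []
  | g+1, i =>
    if i < s.length then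
      if PySem.Chars.startswith (s.drop i) "</div>".toList then
        (i, true) :: fmbTokens s g (i+6)
      else if PySem.Chars.startswith (s.drop i) "<div".toList then
        (i, false) :: fmbTokens s g (i+4)
      else fmbTokens s g (i+1)
    else []

-- B's for-loop over the token list, carrying the depth counter
def fmbWalk (cs : Int) : List (Nat × Bool) → Int → Option Int × Option Int
  | [], _ => (none, none)
  | (p, true) :: rest, depth =>
      if depth - 1 = 0 then (some cs, some (p : Int)) else fmbWalk cs rest (depth - 1)
  | (_, false) :: rest, depth => fmbWalk cs rest (depth + 1)

def find_mistakes_body_alt (html : String) : Option Int × Option Int :=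
  let s := html.toList
  let section_pos := PySem.Chars.find s "<section id=\"mistakes\">".toList
  if section_pos = -1 then (none, none)
  else
    let marker := "<div class=\"bg-white px-8 py-7 space-y-6\">".toList
    let body_start := PySem.Chars.findFrom s marker section_pos none
    if body_start = -1 then (none, none)
    else
      -- content_start ≥ 0 here (body_start ≠ -1), so .toNat is exact
      let content_start := body_start + PySem.Chars.len marker
      fmbWalk content_start (fmbTokens s (s.length + 1) content_start.toNat) 1

-- ===== PRECONDITION & SPEC =====
def Spec_find_mistakes_body (html : String) (out : Option Int × Option Int) : Prop := out = find_mistakes_body_alt html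
instance (html : String) (out : Option Int × Option Int) : Decidable (Spec_find_mistakes_body html out) := by unfold Spec_find_mistakes_body; infer_instance

-- ===== CLAIM (what is proved, stated in full; the proofs are below) =====
def Claim_equal_find_mistakes_body : Prop := ∀ (html : String), Dom_find_mistakes_body html → Spec_find_mistakes_body html (find_mistakes_body html)

-- ===== LEMMAS AND PROOFS =====

lemma fmb_findFrom_of_prefix (s p : List Char) (i : Nat) (hi : i ≤ s.length)
    (h : p <+: s.drop i) : PySem.Chars.findFrom s p (i : Int) none = (i : Int) := by
  have hne : PySem.Chars.findFrom s p (i : Int) none ≠ -1 :=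
    fun he => ((PySem.Chars.findFrom_natCast_eq_neg_one_iff s p i hi).mp he) h.isInfix
  obtain ⟨h1, h2, h3⟩ := PySem.Chars.findFrom_natCast_spec s p i hi hne
  by_contra hne2
  have hlt : i < (PySem.Chars.findFrom s p (i : Int) none).toNat := by omega
  exact h3 i le_rfl hlt h

lemma fmb_findFrom_succ (s p : List Char) (i : Nat) (hi : i < s.length)
    (h : ¬ p <+: s.drop i) :
    PySem.Chars.findFrom s p (i : Int) none = PySem.Chars.findFrom s p ((i : Int) + 1) none := by
  have hi1 : i + 1 ≤ s.length := hi
  have hcast : ((i : Int) + 1) = ((i + 1 : Nat) : Int) := by push_cast; ring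
  have hdrop : s.drop i = s[i] :: s.drop (i + 1) := List.drop_eq_getElem_cons hi
  have hiff : p <:+: s.drop i ↔ p <:+: s.drop (i + 1) := by
    rw [hdrop, List.infix_cons_iff]
    constructor
    · rintro (hpre | hinf)
      · exact absurd (hdrop ▸ hpre) h
      · exact hinf
    · exact Or.inr
  rw [hcast]
  by_cases hI : p <:+: s.drop (i + 1)
  · have hne1 : PySem.Chars.findFrom s p (i : Int) none ≠ -1 :=
      fun he => ((PySem.Chars.findFrom_natCast_eq_neg_one_iff s p i hi.le).mp he) (hiff.mpr hI)
    have hne2 : PySem.Chars.findFrom s p ((i+1 : Nat) : Int) none ≠ -1 :=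
      fun he => ((PySem.Chars.findFrom_natCast_eq_neg_one_iff s p (i+1) hi1).mp he) hI
    obtain ⟨a1, a2, a3⟩ := PySem.Chars.findFrom_natCast_spec s p i hi.le hne1
    obtain ⟨b1, b2, b3⟩ := PySem.Chars.findFrom_natCast_spec s p (i+1) hi1 hne2
    set r1 := PySem.Chars.findFrom s p (i : Int) none with hr1
    set r2 := PySem.Chars.findFrom s p ((i+1 : Nat) : Int) none with hr2
    have hr1i : r1.toNat ≠ i := fun he => h (he ▸ a2)
    have hb : ¬ (r2.toNat < r1.toNat) := fun hlt => a3 r2.toNat (by omega) hlt b2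
    have ha : ¬ (r1.toNat < r2.toNat) := fun hlt => b3 r1.toNat (by push_cast at a1 b1 ⊢; omega) hlt a2
    omega
  · rw [(PySem.Chars.findFrom_natCast_eq_neg_one_iff s p i hi.le).mpr (fun hc => hI (hiff.mp hc)),
        (PySem.Chars.findFrom_natCast_eq_neg_one_iff s p (i+1) hi1).mpr (fun hc => hI hc)]

lemma fmb_not_both {l : List Char} (h1 : "<div".toList <+: l)
    (h2 : "</div>".toList <+: l) : False := by
  obtain ⟨t, rfl⟩ := h1
  simp [List.cons_prefix_cons] at h2

lemma fmb_loopA_shift (s : List Char) (f : Nat) (d : Int) (i : Nat) (cs : Int)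
    (hi : i < s.length)
    (hno : ¬ "<div".toList <+: s.drop i) (hnc : ¬ "</div>".toList <+: s.drop i) :
    fmbLoopA s (f+1) d (i : Int) cs = fmbLoopA s (f+1) d ((i : Int) + 1) cs := by
  by_cases hd : 0 < d
  · have g1 : (i : Int) < PySem.Chars.len s := by
      simp only [PySem.Chars.len_eq]; exact_mod_cast hi
    by_cases h1 : i + 1 < s.length
    · have e1 := fmb_findFrom_succ s "<div".toList i hi hno
      have e2 := fmb_findFrom_succ s "</div>".toList i hi hnc
      have g2 : (i : Int) + 1 < PySem.Chars.len s := by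
        simp only [PySem.Chars.len_eq]; exact_mod_cast h1
      simp only [fmbLoopA]
      rw [e1, e2, if_pos (And.intro g1 (by omega)), if_pos (And.intro g2 hd)]
    · have hdropnil : s.drop (i+1) = [] := List.drop_eq_nil_of_le (by omega)
      have hninf : ¬ "</div>".toList <:+: s.drop i := by
        intro hinf
        rw [List.drop_eq_getElem_cons hi, hdropnil] at hinf
        rcases List.infix_cons_iff.mp hinf with hp | hp
        · rw [List.drop_eq_getElem_cons hi, hdropnil] at hnc
          exact hnc hp
        · simp at hp
      have hclose : PySem.Chars.findFrom s "</div>".toList (i : Int) none = -1 :=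
        (PySem.Chars.findFrom_natCast_eq_neg_one_iff s _ i hi.le).mpr hninf
      have g2 : ¬ ((i : Int) + 1 < PySem.Chars.len s ∧ 0 < d) := by
        simp only [PySem.Chars.len_eq]; omega
      simp only [fmbLoopA]
      rw [hclose, if_pos (And.intro g1 (by omega)), if_neg g2]
      simp
  · have g : ∀ (p : Int), ¬ (p < PySem.Chars.len s ∧ 0 < d) := fun p h => hd h.2
    simp only [fmbLoopA]
    rw [if_neg (g _), if_neg (g _)]

lemma fmb_loopA_stop (s : List Char) (f : Nat) (d : Int) (i : Nat) (cs : Int)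
    (h : ¬ ((i : Int) < PySem.Chars.len s ∧ 0 < d)) : fmbLoopA s f d (i : Int) cs = (none, none) := by
  cases f with
  | zero => rfl
  | succ f => simp only [fmbLoopA]; rw [if_neg h]

lemma fmb_tokens_stop (s : List Char) (g : Nat) (i : Nat)
    (h : ¬ i < s.length) : fmbTokens s g i = [] := by
  cases g with
  | zero => rfl
  | succ g => simp only [fmbTokens]; rw [if_neg h]

lemma fmb_noclose_mono {s : List Char} {i j : Nat} (hij : i ≤ j)
    (h : ¬ ("</div>".toList <:+: s.drop i)) : ¬ ("</div>".toList <:+: s.drop j) := by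
  intro hinf
  apply h
  have : s.drop j = (s.drop i).drop (j - i) := by rw [List.drop_drop]; congr 1; omega
  exact hinf.trans (this ▸ (List.drop_suffix (j-i) (s.drop i)).isInfix)

-- if no '</div>' occurs at or after i, the token stream from i contains only
-- opens, so the depth fold never returns early
lemma fmb_walk_noclose (s : List Char) : ∀ (g : Nat) (i : Nat) (d cs : Int),
    ¬ ("</div>".toList <:+: s.drop i) → fmbWalk cs (fmbTokens s g i) d = (none, none) := by
  intro g
  induction g with
  | zero => intro i d cs _; rfl
  | succ g ih =>
    intro i d cs h
    simp only [fmbTokens]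
    by_cases hi : i < s.length
    · rw [if_pos hi]
      have hcl : ¬ ("</div>".toList <+: s.drop i) := fun hp => h hp.isInfix
      rw [if_neg (by simp only [PySem.Chars.startswith_iff _ _]; exact hcl)]
      by_cases hop : PySem.Chars.startswith (s.drop i) "<div".toList = true
      · rw [if_pos hop]
        simp only [fmbWalk]
        exact ih (i+4) (d+1) cs (fmb_noclose_mono (by omega) h)
      · rw [if_neg hop]
        exact ih (i+1) d cs (fmb_noclose_mono (by omega) h)
    · rw [if_neg hi]; rfl

lemma fmb_loop_eq (s : List Char) : ∀ (k f g : Nat) (d : Int) (i : Nat) (cs : Int),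
    s.length ≤ i + k → k ≤ f → k ≤ g → 1 ≤ d →
    fmbLoopA s f d (i : Int) cs = fmbWalk cs (fmbTokens s g i) d := by
  intro k
  induction k with
  | zero =>
    intro f g d i cs hk _ _ _
    rw [fmb_loopA_stop s f d i cs (by simp only [PySem.Chars.len_eq]; omega),
        fmb_tokens_stop s g i (by omega)]
    rfl
  | succ k ih =>
    intro f g d i cs hk hf hg hd
    by_cases hi : i < s.length
    · obtain ⟨f', rfl⟩ : ∃ f', f = f'+1 := ⟨f-1, by omega⟩
      obtain ⟨g', rfl⟩ : ∃ g', g = g'+1 := ⟨g-1, by omega⟩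
      have g1 : (i : Int) < PySem.Chars.len s := by
        simp only [PySem.Chars.len_eq]; exact_mod_cast hi
      by_cases hc : "</div>".toList <+: s.drop i
      · have hnceq : PySem.Chars.findFrom s "</div>".toList (i : Int) none = (i : Int) :=
          fmb_findFrom_of_prefix s _ i hi.le hc
        have hnotopen : ¬ "<div".toList <+: s.drop i := fun ho => fmb_not_both ho hc
        have hopenF : ¬ (PySem.Chars.findFrom s "<div".toList (i : Int) none ≠ -1 ∧
            PySem.Chars.findFrom s "<div".toList (i : Int) none < (i : Int)) := by
          rintro ⟨hne, hlt⟩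
          obtain ⟨a1, _, _⟩ := PySem.Chars.findFrom_natCast_spec s _ i hi.le hne
          omega
        simp only [fmbLoopA, fmbTokens]
        rw [if_pos (And.intro g1 (by omega)), if_pos hi, hnceq,
            if_neg (show ¬ ((i : Int)) = -1 by omega), if_neg hopenF,
            if_pos ((PySem.Chars.startswith_iff _ _).mpr hc)]
        simp only [fmbWalk]
        by_cases hd1 : d = 1
        · rw [if_pos hd1, if_pos (show d - 1 = 0 by omega)]
        · rw [if_neg hd1, if_neg (show ¬ d - 1 = 0 by omega)]
          exact ih f' g' (d-1) (i+6) cs (by omega) (by omega) (by omega) (by omega)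
      · by_cases ho : "<div".toList <+: s.drop i
        · have hnoeq : PySem.Chars.findFrom s "<div".toList (i : Int) none = (i : Int) :=
            fmb_findFrom_of_prefix s _ i hi.le ho
          simp only [fmbLoopA, fmbTokens]
          rw [if_pos (And.intro g1 (by omega)), if_pos hi, hnoeq,
              if_neg (show ¬ PySem.Chars.startswith (s.drop i) "</div>".toList = true by
                simp only [PySem.Chars.startswith_iff _ _]; exact hc),
              if_pos ((PySem.Chars.startswith_iff _ _).mpr ho)]
          simp only [fmbWalk]
          by_cases hcf : PySem.Chars.findFrom s "</div>".toList (i : Int) none = -1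
          · rw [if_pos hcf]
            have hninf : ¬ "</div>".toList <:+: s.drop i :=
              (PySem.Chars.findFrom_natCast_eq_neg_one_iff s _ i hi.le).mp hcf
            rw [fmb_walk_noclose s g' (i+4) (d+1) cs (fmb_noclose_mono (by omega) hninf)]
          · rw [if_neg hcf]
            obtain ⟨c1, c2, c3⟩ := PySem.Chars.findFrom_natCast_spec s _ i hi.le hcf
            have hne_i : PySem.Chars.findFrom s "</div>".toList (i : Int) none ≠ (i : Int) := by
              intro he
              rw [he] at c2
              exact hc (by simpa using c2)
            rw [if_pos (And.intro (show ¬ ((i:Int)) = -1 by omega) (by omega)),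
                show ((i : Int) + 4) = ((i + 4 : Nat) : Int) by push_cast; ring]
            exact ih f' g' (d+1) (i+4) cs (by omega) (by omega) (by omega) (by omega)
        · rw [fmb_loopA_shift s f' d i cs hi ho hc]
          have hB : fmbTokens s (g'+1) i = fmbTokens s g' (i+1) := by
            simp only [fmbTokens]
            rw [if_pos hi,
                if_neg (show ¬ PySem.Chars.startswith (s.drop i) "</div>".toList = true by
                  simp only [PySem.Chars.startswith_iff _ _]; exact hc),
                if_neg (show ¬ PySem.Chars.startswith (s.drop i) "<div".toList = true by
                  simp only [PySem.Chars.startswith_iff _ _]; exact ho)]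
          rw [hB, show ((i : Int) + 1) = ((i + 1 : Nat) : Int) by push_cast; ring]
          exact ih (f'+1) g' d (i+1) cs (by omega) (by omega) (by omega) hd
    · rw [fmb_loopA_stop s _ d i cs (by simp only [PySem.Chars.len_eq]; omega),
          fmb_tokens_stop s _ i hi]
      rfl

-- ===== VERDICT (by name: the statement is the Claim_ definition above) =====
theorem find_mistakes_body_spec : Claim_equal_find_mistakes_body := by
  intro html _
  unfold Spec_find_mistakes_body
  simp only [find_mistakes_body, find_mistakes_body_alt]
  by_cases h1 : PySem.Chars.find html.toList "<section id=\"mistakes\">".toList = -1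
  · rw [if_pos h1, if_pos h1]
  · rw [if_neg h1, if_neg h1]
    by_cases h2 : PySem.Chars.findFrom html.toList
        "<div class=\"bg-white px-8 py-7 space-y-6\">".toList
        (PySem.Chars.find html.toList "<section id=\"mistakes\">".toList) none = -1
    · rw [if_pos h2, if_pos h2]
    · rw [if_neg h2, if_neg h2]
      set s := html.toList with hs
      set sp := PySem.Chars.find s "<section id=\"mistakes\">".toList with hspdef
      set marker := "<div class=\"bg-white px-8 py-7 space-y-6\">".toList with hmdef
      set bs := PySem.Chars.findFrom s marker sp none with hbsdef
      have hsp0 : 0 ≤ sp := by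
        have := PySem.Chars.neg_one_le_find s "<section id=\"mistakes\">".toList
        rw [← hspdef] at this; omega
      have hsplen : sp ≤ (s.length : Int) := by
        have := PySem.Chars.find_le_length s "<section id=\"mistakes\">".toList
        rw [← hspdef] at this; exact_mod_cast this
      have hspc : ((sp.toNat : Nat) : Int) = sp := Int.toNat_of_nonneg hsp0
      have hbs0 : 0 ≤ bs := by
        have hne : PySem.Chars.findFrom s marker ((sp.toNat : Nat) : Int) none ≠ -1 := by
          rw [hspc]; exact h2
        obtain ⟨b1, -, -⟩ := PySem.Chars.findFrom_natCast_spec s marker sp.toNat (by omega) hne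
        rw [hspc] at b1; rw [hbsdef]; omega
      have hcs0 : 0 ≤ bs + PySem.Chars.len marker := by
        rw [PySem.Chars.len_eq]; positivity
      have key := fmb_loop_eq s s.length (s.length + 1) (s.length + 1) 1
        (bs + PySem.Chars.len marker).toNat (bs + PySem.Chars.len marker)
        (by omega) (by omega) (by omega) le_rfl
      rw [Int.toNat_of_nonneg hcs0] at key
      exact key
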